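-- pv_equiv track=rewrite | github.com/L0rd-AK/Competitive-Programming-practice | CodeForces-Problems/Max_Split-S.py | split_balanced
-- ===== SOURCE A (Python) =====
-- def split_balanced(s: str):
--     parts = []
--     curr = []
--     balance = 0
--     for ch in s:
--         if ch == 'L':
--             balance += 1
--         else:  # 'R'
--             balance -= 1
--         curr.append(ch)
--         if balance == 0:
--             parts.append(''.join(curr))
--             curr = []
--     return parts
-- ===== SOURCE B (Python) =====
-- def split_balanced(s: str):
--     # prefix-balance pass, then slice between zero boundaries
--     running = []
--     bal = 0
--     for ch in s:
--         bal += 1 if ch == 'L' else -1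
--         running.append(bal)
--     zeros = [i for i, v in enumerate(running) if v == 0]
--     parts = []
--     start = 0
--     for i in zeros:
--         parts.append(s[start:i + 1])
--         start = i + 1
--     return parts
-- ===== Notes on version B (the rewrite author's own statement) =====
-- stated objective: alternative
-- what changed: B replaces A's single stateful loop that accumulates the current chunk character-by-character with a two-phase pipeline: compute the prefix-balance list, collect the indices where it is zero, and build the result by slicing the input string between consecutive zero boundaries.
import Mathlib
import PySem

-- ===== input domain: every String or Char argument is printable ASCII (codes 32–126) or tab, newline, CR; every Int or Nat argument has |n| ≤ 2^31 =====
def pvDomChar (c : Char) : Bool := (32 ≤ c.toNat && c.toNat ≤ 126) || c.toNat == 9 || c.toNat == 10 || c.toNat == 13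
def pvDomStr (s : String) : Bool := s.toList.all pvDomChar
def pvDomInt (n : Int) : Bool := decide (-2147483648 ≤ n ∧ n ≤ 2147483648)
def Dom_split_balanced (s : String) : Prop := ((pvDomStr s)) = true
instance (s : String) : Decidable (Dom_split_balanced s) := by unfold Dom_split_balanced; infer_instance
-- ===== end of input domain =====

-- B replaces A's stateful chunk-accumulating loop with a prefix-balance pass, zero-index
-- collection and slicing between the zero boundaries (objective: alternative decomposition).

-- ===== PORT A =====
def aStep (st : List String × List Char × Int) (ch : Char) : List String × List Char × Int :=
  let bal := st.2.2 + (if ch = 'L' then 1 else -1)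
  let curr := st.2.1 ++ [ch]
  if bal = 0 then (st.1 ++ [String.ofList curr], [], bal) else (st.1, curr, bal)

def split_balanced (s : String) : List String :=
  (s.toList.foldl aStep ([], [], 0)).1

-- ===== PORT B =====
-- the prefix-balance list ('running' in Source B)
def runningOf : List Char → Int → List Int
  | [], _ => []
  | c :: t, bal =>
    let b := bal + (if c = 'L' then 1 else -1)
    b :: runningOf t b

-- one step of Source B's final loop over the zero indices
def bStep (s : String) (st : List String × Int) (i : Int) : List String × Int :=
  (st.1 ++ [PySem.Str.slice s (some st.2) (some (i + 1))], i + 1)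

def split_balanced_alt (s : String) : List String :=
  let running := runningOf s.toList 0
  let zeros := ((PySem.List.enumerate running).filter (fun p => p.2 == 0)).map Prod.fst
  (zeros.foldl (bStep s) ([], 0)).1

-- ===== PRECONDITION & SPEC =====
def Spec_split_balanced (s : String) (out : List String) : Prop := out = split_balanced_alt s
instance (s : String) (out : List String) : Decidable (Spec_split_balanced s out) := by unfold Spec_split_balanced; infer_instance

-- ===== CLAIM (what is proved, stated in full; the proofs are below) =====
def Claim_equal_split_balanced : Prop := ∀ (s : String), Dom_split_balanced s → Spec_split_balanced s (split_balanced s)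

-- ===== LEMMAS AND PROOFS =====

-- common reference: the natural recursive splitter
def core : List Char → List Char → Int → List String
  | [], _, _ => []
  | c :: t, curr, bal =>
    let b := bal + (if c = 'L' then 1 else -1)
    if b = 0 then String.ofList (curr ++ [c]) :: core t [] 0
    else core t (curr ++ [c]) b

theorem aFold_eq_core (t : List Char) : ∀ (parts : List String) (curr : List Char) (bal : Int),
    (t.foldl aStep (parts, curr, bal)).1 = parts ++ core t curr bal := by
  induction t with
  | nil => intro parts curr bal; simp [core]
  | cons c t ih =>
    intro parts curr bal
    simp only [List.foldl_cons, aStep, core]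
    by_cases h : bal + (if c = 'L' then 1 else -1) = 0 <;> simp [h, ih]

-- absolute indices (starting at n) where the prefix balance (starting at bal) hits zero
def zerosAux : List Char → Int → Int → List Int
  | [], _, _ => []
  | c :: t, n, bal =>
    let b := bal + (if c = 'L' then 1 else -1)
    if b = 0 then n :: zerosAux t (n + 1) b else zerosAux t (n + 1) b

theorem zeros_eq (t : List Char) : ∀ (bal n : Int),
    ((PySem.List.enumerate (runningOf t bal) n).filter (fun p => p.2 == 0)).map Prod.fst
      = zerosAux t n bal := by
  induction t with
  | nil => intro bal n; simp [runningOf, zerosAux, PySem.List.enumerate]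
  | cons c t ih =>
    intro bal n
    simp only [runningOf, zerosAux, PySem.List.enumerate_cons, List.filter_cons]
    by_cases h : bal + (if c = 'L' then 1 else -1) = 0 <;> simp [h, ih]

theorem bFold_eq_core (t : List Char) :
    ∀ (pre curr : List Char) (bal : Int) (acc : List String) (s : String),
    s.toList = pre ++ curr ++ t →
    ((zerosAux t ((pre.length : Int) + (curr.length : Int)) bal).foldl (bStep s)
        (acc, (pre.length : Int))).1 = acc ++ core t curr bal := by
  induction t with
  | nil => intro pre curr bal acc s _; simp [zerosAux, core]
  | cons c t ih =>
    intro pre curr bal acc s hs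
    simp only [zerosAux, core]
    by_cases h : bal + (if c = 'L' then 1 else -1) = 0
    · rw [if_pos h, if_pos h]
      simp only [List.foldl_cons, bStep]
      have hslice : PySem.Str.slice s (some (pre.length : Int))
          (some ((pre.length : Int) + (curr.length : Int) + 1)) = String.ofList (curr ++ [c]) := by
        apply String.toList_inj.mp
        rw [PySem.Str.toList_slice, PySem.Chars.slice_eq_listSlice, hs]
        have : ((pre.length : Int) + (curr.length : Int) + 1)
            = ((pre.length + (curr.length + 1) : Nat) : Int) := by push_cast; ring
        rw [this, PySem.List.slice_natCast]
        simp [List.take_append]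
      rw [hslice]
      have h2 := ih (pre ++ curr ++ [c]) [] 0 (acc ++ [String.ofList (curr ++ [c])]) s
        (by simp [hs])
      simp only [List.length_append, List.length_cons, List.length_nil, Nat.add_zero,
        Nat.zero_add] at h2
      push_cast at h2
      rw [add_zero] at h2
      rw [h, h2]
      simp
    · rw [if_neg h, if_neg h]
      have h2 := ih pre (curr ++ [c]) (bal + (if c = 'L' then 1 else -1)) acc s
        (by simp [hs])
      simp only [List.length_append, List.length_cons, List.length_nil, Nat.add_zero,
        Nat.zero_add] at h2
      push_cast at h2
      rw [← add_assoc] at h2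
      rw [h2]

-- ===== VERDICT (by name: the statement is the Claim_ definition above) =====
theorem split_balanced_spec : Claim_equal_split_balanced := by
  intro s _
  have hB : split_balanced_alt s = ((zerosAux s.toList 0 0).foldl (bStep s) ([], 0)).1 := by
    unfold split_balanced_alt
    simp only [zeros_eq]
  have h := bFold_eq_core s.toList [] [] 0 [] s (by simp)
  unfold Spec_split_balanced split_balanced
  rw [aFold_eq_core, hB]
  simpa using h.symm
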